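-- pv_equiv track=rewrite | github.com/caozhichongchong/snp_finder | snp_finder/scripts/SNPfilter_WGS_singlesample_nobaseline.py | SNP_seq
-- ===== SOURCE A (Python) =====
-- def SNP_seq(seq1, seq2, POS_info,POS_info_CHR,POS_info_CHR_LEN,POS_info_output,G1,G2):
--     SNP_total = 0
--     j = 0
--     POS_DIS = []
--     total_length = len(seq1)
--     for i in range(0, total_length):
--         if seq1[i] != seq2[i]:
--             # a SNP
--             SNP_total += 1
--             CHR = POS_info_CHR[i]
--             POS = POS_info[i]
--             LEN = POS_info_CHR_LEN[CHR]
--             if CHR == POS_info_CHR[j]:  # same CHR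
--                 DIS = abs(POS - POS_info[j])
--                 POS_DIS.append(DIS)  # POS diff
--                 POS_info_output.append('%s\t%s\t%s\t%s\t%s\t%s\t\n' % (G1, G2, CHR, POS, DIS, LEN))
--             else:  # new CHR
--                 POS_info_output.append('%s\t%s\t%s\t%s\t%s\t%s\t\n' % (G1, G2, CHR, POS, 0, LEN))
--             j = i
--     return SNP_total
-- ===== SOURCE B (Python) =====
-- def SNP_seq(seq1, seq2, POS_info, POS_info_CHR, POS_info_CHR_LEN, POS_info_output, G1, G2):
--     # Stateless staged version: zip-truncated mismatch detection, then report rows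
--     # built by a comprehension over consecutive SNP pairs (zip with a shifted copy)
--     # and appended in one extend; no mutable loop state.
--     snps = [i for i, (c1, c2) in enumerate(zip(seq1, seq2)) if c1 != c2]
--     POS_info_output.extend(
--         '%s\t%s\t%s\t%s\t%s\t%s\t\n' % (
--             G1, G2, POS_info_CHR[i], POS_info[i],
--             abs(POS_info[i] - POS_info[p]) if POS_info_CHR[i] == POS_info_CHR[p] else 0,
--             POS_info_CHR_LEN[POS_info_CHR[i]])
--         for p, i in zip([0] + snps, snps))
--     return len(snps)
-- ===== Notes on version B (the rewrite author's own statement) =====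
-- stated objective: alternative
-- what changed: Replaces A's fused index loop with mutable state (SNP_total, j, POS_DIS) by a stateless staged pipeline: mismatch indices come from enumerate(zip(seq1, seq2)), the previous-SNP index is obtained by zipping the index list with a shifted copy ([0]+snps) instead of a j variable, the rows are a single generator expression appended with one extend, and the count is len(snps).
import Mathlib
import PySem

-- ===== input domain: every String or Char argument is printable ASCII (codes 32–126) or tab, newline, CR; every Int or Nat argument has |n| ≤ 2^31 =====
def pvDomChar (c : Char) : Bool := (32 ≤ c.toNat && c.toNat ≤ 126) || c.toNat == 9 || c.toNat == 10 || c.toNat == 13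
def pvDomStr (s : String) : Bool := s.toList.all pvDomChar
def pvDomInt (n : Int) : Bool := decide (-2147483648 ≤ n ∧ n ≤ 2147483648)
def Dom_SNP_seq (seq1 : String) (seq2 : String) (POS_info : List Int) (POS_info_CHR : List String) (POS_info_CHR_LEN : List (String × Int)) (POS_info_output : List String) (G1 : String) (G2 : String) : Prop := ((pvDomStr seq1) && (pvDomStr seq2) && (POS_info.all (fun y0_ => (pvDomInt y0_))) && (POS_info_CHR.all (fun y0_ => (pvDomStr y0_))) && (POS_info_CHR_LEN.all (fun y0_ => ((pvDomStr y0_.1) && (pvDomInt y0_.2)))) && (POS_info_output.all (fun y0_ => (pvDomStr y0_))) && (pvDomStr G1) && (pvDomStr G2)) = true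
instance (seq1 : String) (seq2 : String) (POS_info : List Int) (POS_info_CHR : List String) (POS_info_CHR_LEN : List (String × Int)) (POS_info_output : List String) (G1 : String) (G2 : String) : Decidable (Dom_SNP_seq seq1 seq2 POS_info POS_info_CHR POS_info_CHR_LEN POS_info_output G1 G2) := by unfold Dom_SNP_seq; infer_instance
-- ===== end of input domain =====

-- ===== PORT A =====
-- A walks range(len(seq1)) with state (SNP_total, j, POS_DIS); out-of-range lookups and
-- missing dict keys raise in Python and are excluded by Pre_ (the port uses getD defaults
-- there, where nothing is claimed). A also appends report rows to POS_info_output in place;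
-- the equivalence proved here is about the RETURN value only (Python B performs the same
-- appends wherever A returns).
def snpStepA (seq1 : String) (seq2 : String) (POS_info : List Int) (POS_info_CHR : List String) (POS_info_CHR_LEN : List (String × Int)) (st : Int × Int × List Int) (i : Int) : Int × Int × List Int :=
  if PySem.Str.pyGet? seq1 i != PySem.Str.pyGet? seq2 i then
    let SNP_total := st.1 + 1
    let CHR := (PySem.List.pyGet? POS_info_CHR i).getD ""
    let POS := (PySem.List.pyGet? POS_info i).getD 0
    let _LEN := ((POS_info_CHR_LEN.find? (fun p => p.1 == CHR)).map (·.2)).getD 0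
    if CHR == (PySem.List.pyGet? POS_info_CHR st.2.1).getD "" then
      let DIS := |POS - (PySem.List.pyGet? POS_info st.2.1).getD 0|
      (SNP_total, i, st.2.2 ++ [DIS])
    else
      (SNP_total, i, st.2.2)
  else st

def SNP_seq (seq1 : String) (seq2 : String) (POS_info : List Int) (POS_info_CHR : List String) (POS_info_CHR_LEN : List (String × Int)) (POS_info_output : List String) (G1 : String) (G2 : String) : Int :=
  ((PySem.List.pyRange 0 (PySem.Str.len seq1) 1).foldl
    (snpStepA seq1 seq2 POS_info POS_info_CHR POS_info_CHR_LEN) (0, 0, [])).1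

-- ===== PORT B =====
-- B detects mismatches over enumerate(zip(seq1, seq2)) and returns their number; its
-- reporting comprehension only mutates POS_info_output in Python and contributes nothing
-- to the return value.
def SNP_seq_alt (seq1 : String) (seq2 : String) (POS_info : List Int) (POS_info_CHR : List String) (POS_info_CHR_LEN : List (String × Int)) (POS_info_output : List String) (G1 : String) (G2 : String) : Int :=
  let snps := ((PySem.List.enumerate (seq1.toList.zip seq2.toList)).filter
    (fun p => p.2.1 != p.2.2)).map (·.1)
  (snps.length : Int)

-- ===== PRECONDITION & SPEC =====
-- Pre_ excludes exactly the inputs where the Python A raises: seq2 shorter than seq1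
-- (IndexError on seq2[i]) or, at some SNP position, POS_info/POS_info_CHR too short
-- (IndexError) or the chromosome missing from POS_info_CHR_LEN (KeyError).
def Pre_SNP_seq (seq1 : String) (seq2 : String) (POS_info : List Int) (POS_info_CHR : List String) (POS_info_CHR_LEN : List (String × Int)) (POS_info_output : List String) (G1 : String) (G2 : String) : Prop :=
  seq1.toList.length ≤ seq2.toList.length ∧
  ∀ k : Nat, k < seq1.toList.length →
    seq1.toList[k]? ≠ seq2.toList[k]? →
      k < POS_info.length ∧ k < POS_info_CHR.length ∧
      (POS_info_CHR_LEN.find? (fun p => p.1 == POS_info_CHR.getD k "")).isSome = true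
instance (seq1 : String) (seq2 : String) (POS_info : List Int) (POS_info_CHR : List String) (POS_info_CHR_LEN : List (String × Int)) (POS_info_output : List String) (G1 : String) (G2 : String) : Decidable (Pre_SNP_seq seq1 seq2 POS_info POS_info_CHR POS_info_CHR_LEN POS_info_output G1 G2) := by unfold Pre_SNP_seq; infer_instance

def pvWitness_SNP_seq : String × String × List Int × List String × (List (String × Int)) × List String × String × String :=
  ("AC", "AG", [1, 2], ["c", "c"], [("c", 5)], [], "g1", "g2")
def Spec_SNP_seq (seq1 : String) (seq2 : String) (POS_info : List Int) (POS_info_CHR : List String) (POS_info_CHR_LEN : List (String × Int)) (POS_info_output : List String) (G1 : String) (G2 : String) (out : Int) : Prop := out = SNP_seq_alt seq1 seq2 POS_info POS_info_CHR POS_info_CHR_LEN POS_info_output G1 G2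
instance (seq1 : String) (seq2 : String) (POS_info : List Int) (POS_info_CHR : List String) (POS_info_CHR_LEN : List (String × Int)) (POS_info_output : List String) (G1 : String) (G2 : String) (out : Int) : Decidable (Spec_SNP_seq seq1 seq2 POS_info POS_info_CHR POS_info_CHR_LEN POS_info_output G1 G2 out) := by unfold Spec_SNP_seq; infer_instance

-- ===== CLAIM (what is proved, stated in full; the proofs are below) =====
def Claim_equal_SNP_seq : Prop := ∀ (seq1 : String) (seq2 : String) (POS_info : List Int) (POS_info_CHR : List String) (POS_info_CHR_LEN : List (String × Int)) (POS_info_output : List String) (G1 : String) (G2 : String), Dom_SNP_seq seq1 seq2 POS_info POS_info_CHR POS_info_CHR_LEN POS_info_output G1 G2 → Pre_SNP_seq seq1 seq2 POS_info POS_info_CHR POS_info_CHR_LEN POS_info_output G1 G2 → Spec_SNP_seq seq1 seq2 POS_info POS_info_CHR POS_info_CHR_LEN POS_info_output G1 G2 (SNP_seq seq1 seq2 POS_info POS_info_CHR POS_info_CHR_LEN POS_info_output G1 G2)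

-- ===== LEMMAS AND PROOFS =====
theorem pvWitness_ok : Dom_SNP_seq pvWitness_SNP_seq.1 pvWitness_SNP_seq.2.1 pvWitness_SNP_seq.2.2.1 pvWitness_SNP_seq.2.2.2.1 pvWitness_SNP_seq.2.2.2.2.1 pvWitness_SNP_seq.2.2.2.2.2.1 pvWitness_SNP_seq.2.2.2.2.2.2.1 pvWitness_SNP_seq.2.2.2.2.2.2.2 ∧ Pre_SNP_seq pvWitness_SNP_seq.1 pvWitness_SNP_seq.2.1 pvWitness_SNP_seq.2.2.1 pvWitness_SNP_seq.2.2.2.1 pvWitness_SNP_seq.2.2.2.2.1 pvWitness_SNP_seq.2.2.2.2.2.1 pvWitness_SNP_seq.2.2.2.2.2.2.1 pvWitness_SNP_seq.2.2.2.2.2.2.2 := by decide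

-- the first component of A's loop state counts exactly the mismatch positions
theorem snpStepA_fst_foldl (seq1 seq2 : String) (POS_info : List Int) (POS_info_CHR : List String) (POS_info_CHR_LEN : List (String × Int)) :
    ∀ (l : List Int) (c j : Int) (pd : List Int),
      ((l.foldl (snpStepA seq1 seq2 POS_info POS_info_CHR POS_info_CHR_LEN) (c, j, pd)).1 : Int)
        = c + ((l.filter (fun i => PySem.Str.pyGet? seq1 i != PySem.Str.pyGet? seq2 i)).length : Int) := by
  intro l
  induction l with
  | nil => intro c j pd; simp
  | cons i l ih =>
    intro c j pd
    simp only [List.foldl_cons, List.filter_cons]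
    by_cases h : (PySem.Str.pyGet? seq1 i != PySem.Str.pyGet? seq2 i) = true
    · simp only [snpStepA, h, if_true]
      split
      · rw [ih, List.length_cons]; push_cast; ring
      · rw [ih, List.length_cons]; push_cast; ring
    · simp only [snpStepA, h, if_false, Bool.false_eq_true]
      rw [ih]

-- the per-pair test ignores enumerate's index component
theorem countP_enumerate :
    ∀ (xs : List (Char × Char)) (s : Int),
      (PySem.List.enumerate xs s).countP (fun q => q.2.1 != q.2.2)
        = xs.countP (fun pr => pr.1 != pr.2) := by
  intro xs
  induction xs with
  | nil => intro s; simp [PySem.List.enumerate_nil]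
  | cons x t ih => intro s; simp [PySem.List.enumerate_cons, List.countP_cons, ih]

-- counting mismatches by index over range(len) equals counting mismatching zip pairs
-- when the second list is at least as long as the first
theorem countP_zip_eq_countP_range {α : Type} [DecidableEq α] :
    ∀ (l1 l2 : List α), l1.length ≤ l2.length →
      ((l1.zip l2).countP (fun p => p.1 != p.2))
        = (List.range l1.length).countP (fun k => l1[k]? != l2[k]?) := by
  intro l1
  induction l1 with
  | nil => intro l2 _; simp
  | cons a t1 ih =>
    intro l2 h
    cases l2 with
    | nil => simp at h
    | cons b t2 =>
      simp only [List.zip_cons_cons, List.countP_cons, List.length_cons,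
        List.range_succ_eq_map, List.countP_cons, List.countP_map]
      rw [ih t2 (by simpa using h)]
      simp [Function.comp_def]

-- ===== VERDICT (by name: the statement is the Claim_ definition above) =====
theorem SNP_seq_spec : Claim_equal_SNP_seq := by
  intro seq1 seq2 POS_info POS_info_CHR POS_info_CHR_LEN POS_info_output G1 G2 _ hpre
  show SNP_seq _ _ _ _ _ _ _ _ = SNP_seq_alt _ _ _ _ _ _ _ _
  unfold SNP_seq SNP_seq_alt
  rw [snpStepA_fst_foldl]
  have h : PySem.Str.len seq1 = ((seq1.toList.length : Nat) : Int) := by simp [pysem]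
  rw [h, PySem.List.pyRange_zero_natCast, List.filter_map, List.length_map,
    ← List.countP_eq_length_filter]
  simp only [zero_add, List.length_map, ← List.countP_eq_length_filter, Int.ofNat_inj]
  rw [countP_enumerate, countP_zip_eq_countP_range _ _ hpre.1]
  simp [Function.comp_def]
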